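-- pv_equiv track=rewrite | github.com/IFpop/Computer_Network_lab | 第三章/lab3-2/Python/lab3-2.py | Send_message
-- ===== SOURCE A (Python) =====
-- def Send_message(FlagString,InfoString,Flag):
--     temp_str = FlagString
--     # 标志位代表bit传输
--     if(Flag == 0):
--         # 遍历所有Infostring中所有的字符，每隔五个填0
--         count = 0
--         for i in range(0,len(InfoString)):
--             if (InfoString[i] == '1'):
--                 count += 1
--             else:
--                 count = 0
--
--             # 连续5个1，后面填0
--             if(count == 5):
--                 temp_str += InfoString[i]
--                 temp_str += '0'
--                 count = 0
--             # 其他情况直接加在末尾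
--             else:
--                 temp_str += InfoString[i]
--         # 最后要加上终止符
--         temp_str += FlagString
--         return temp_str
--     # 字节传输
--     else:
--         for i in range(0,len(InfoString)):
--             # 识别到标记位
--             if(InfoString[i] == '7' and InfoString[i+1] == 'E'):
--                 temp_str += '1B7'
--             elif(InfoString[i] == '1' and InfoString[i+1] == 'B'):
--                 temp_str += '1B1'
--             else:
--                 temp_str += InfoString[i]
--
--         temp_str += FlagString
--         return temp_str
-- ===== SOURCE B (Python) =====
-- def Send_message(FlagString, InfoString, Flag):
--     if Flag == 0:
--         # non-overlapping left-to-right substitution == the consecutive-1 counter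
--         return FlagString + InfoString.replace('11111', '111110') + FlagString
--     out = []
--     for c, nxt in zip(InfoString, InfoString[1:]):
--         if c == '7' and nxt == 'E':
--             out.append('1B7')
--         elif c == '1' and nxt == 'B':
--             out.append('1B1')
--         else:
--             out.append(c)
--     return FlagString + ''.join(out) + InfoString[-1:] + FlagString
-- ===== Notes on version B (the rewrite author's own statement) =====
-- stated objective: idiomatic
-- what changed: The bit branch's consecutive-1 counter loop is replaced by a single non-overlapping str.replace('11111','111110') (a C-level scan instead of a per-character Python loop), and the byte branch's index loop with short-circuited lookahead is replaced by a zip over adjacent character pairs plus the final character.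
-- crash fix: When Flag != 0 and InfoString ends in '7' or '1', A raises IndexError reading InfoString[i+1]; B returns the stuffed string with that last character copied verbatim. — e.g. on Send_message("F", "7", 1): A raises IndexError, B returns "F7F"
import Mathlib
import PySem

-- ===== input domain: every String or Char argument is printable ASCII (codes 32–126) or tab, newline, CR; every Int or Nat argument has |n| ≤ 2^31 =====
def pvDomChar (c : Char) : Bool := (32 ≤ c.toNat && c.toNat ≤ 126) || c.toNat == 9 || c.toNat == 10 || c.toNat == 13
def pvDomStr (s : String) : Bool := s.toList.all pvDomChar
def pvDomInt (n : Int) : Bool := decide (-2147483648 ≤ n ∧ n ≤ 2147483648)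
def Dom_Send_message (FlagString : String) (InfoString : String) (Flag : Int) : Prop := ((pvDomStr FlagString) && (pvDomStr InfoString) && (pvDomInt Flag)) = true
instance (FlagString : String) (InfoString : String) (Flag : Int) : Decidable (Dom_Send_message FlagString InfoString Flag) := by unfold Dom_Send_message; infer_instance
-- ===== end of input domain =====

-- B replaces the bit branch's consecutive-1 counter loop with one non-overlapping replace('11111','111110')
-- and the byte branch's index loop with a zip over adjacent pairs plus the final character (idiomatic; return value only, neither mutates).

-- ===== PORT A =====
-- the Flag == 0 loop of A: walks InfoString's characters, keeping temp_str and count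
def Send_message_bitLoop : List Char → List Char → Nat → List Char
  | [], temp, _ => temp
  | c :: rest, temp, count =>
    let cnt := if c = '1' then count + 1 else 0
    if cnt = 5 then Send_message_bitLoop rest (temp ++ [c, '0']) 0
    else Send_message_bitLoop rest (temp ++ [c]) cnt

-- the byte loop of A: InfoString[i+1] is rest.head?; none = Python's IndexError (short-circuit kept:
-- when InfoString[i] == '7' and the next is not 'E', the elif's first conjunct is False so s[i+1] is not read again)
def Send_message_byteLoop : List Char → List Char → Option (List Char)
  | [], temp => some temp
  | c :: rest, temp =>
    if c = '7' then
      match rest.head? with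
      | none => none
      | some d =>
        if d = 'E' then Send_message_byteLoop rest (temp ++ ['1', 'B', '7'])
        else Send_message_byteLoop rest (temp ++ [c])
    else if c = '1' then
      match rest.head? with
      | none => none
      | some d =>
        if d = 'B' then Send_message_byteLoop rest (temp ++ ['1', 'B', '1'])
        else Send_message_byteLoop rest (temp ++ [c])
    else Send_message_byteLoop rest (temp ++ [c])

def Send_message (FlagString : String) (InfoString : String) (Flag : Int) : String :=
  if Flag = 0 then
    String.ofList (Send_message_bitLoop InfoString.toList FlagString.toList 0 ++ FlagString.toList)
  else
    match Send_message_byteLoop InfoString.toList FlagString.toList with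
    | some temp => String.ofList (temp ++ FlagString.toList)
    | none => ""   -- Python raises IndexError here; excluded by Pre_Send_message

-- ===== PORT B =====
-- Source B's loop over zip(InfoString, InfoString[1:])
def Send_message_altPairs : List (Char × Char) → List Char
  | [] => []
  | (c, nxt) :: rest =>
    (if c = '7' ∧ nxt = 'E' then ['1', 'B', '7']
     else if c = '1' ∧ nxt = 'B' then ['1', 'B', '1']
     else [c]) ++ Send_message_altPairs rest

def Send_message_alt (FlagString : String) (InfoString : String) (Flag : Int) : String :=
  if Flag = 0 then
    FlagString ++ PySem.Str.replace InfoString "11111" "111110" ++ FlagString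
  else
    FlagString ++ String.ofList (Send_message_altPairs (InfoString.toList.zip InfoString.toList.tail))
      ++ PySem.Str.slice InfoString (some (-1)) none ++ FlagString

-- ===== PRECONDITION & SPEC =====
-- Pre_ excludes exactly the inputs where A raises IndexError: Flag ≠ 0 with InfoString ending in '7' or '1'.
def Pre_Send_message (FlagString : String) (InfoString : String) (Flag : Int) : Prop :=
  Flag = 0 ∨ (InfoString.toList.getLast? ≠ some '7' ∧ InfoString.toList.getLast? ≠ some '1')
instance (FlagString : String) (InfoString : String) (Flag : Int) : Decidable (Pre_Send_message FlagString InfoString Flag) := by unfold Pre_Send_message; infer_instance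

def pvWitness_Send_message : String × String × Int := ("~", "0111110", 0)

-- When Flag != 0 and InfoString ends in '7' or '1', A raises IndexError reading InfoString[i+1];
-- B returns the stuffed string with that last character copied verbatim.
def Raises_Send_message (FlagString : String) (InfoString : String) (Flag : Int) : Prop :=
  Flag ≠ 0 ∧ (InfoString.toList.getLast? = some '7' ∨ InfoString.toList.getLast? = some '1')
instance (FlagString : String) (InfoString : String) (Flag : Int) : Decidable (Raises_Send_message FlagString InfoString Flag) := by unfold Raises_Send_message; infer_instance

def pvRaiseWitness_Send_message : String × String × Int := ("F", "7", 1)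
def pvRaiseWitnessOut_Send_message : String := "F7F"

def Spec_Send_message (FlagString : String) (InfoString : String) (Flag : Int) (out : String) : Prop := out = Send_message_alt FlagString InfoString Flag
instance (FlagString : String) (InfoString : String) (Flag : Int) (out : String) : Decidable (Spec_Send_message FlagString InfoString Flag out) := by unfold Spec_Send_message; infer_instance

-- ===== CLAIM (what is proved, stated in full; the proofs are below) =====
def Claim_equal_Send_message : Prop := ∀ (FlagString : String) (InfoString : String) (Flag : Int), Dom_Send_message FlagString InfoString Flag → Pre_Send_message FlagString InfoString Flag → Spec_Send_message FlagString InfoString Flag (Send_message FlagString InfoString Flag)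

-- proved below as theorem Send_message_raises
def Claim_raises_Send_message : Prop := (∀ (FlagString : String) (InfoString : String) (Flag : Int), Dom_Send_message FlagString InfoString Flag → Raises_Send_message FlagString InfoString Flag → ¬ Pre_Send_message FlagString InfoString Flag) ∧ (Dom_Send_message (pvRaiseWitness_Send_message.1) (pvRaiseWitness_Send_message.2.1) (pvRaiseWitness_Send_message.2.2) ∧ Raises_Send_message (pvRaiseWitness_Send_message.1) (pvRaiseWitness_Send_message.2.1) (pvRaiseWitness_Send_message.2.2) ∧ Send_message_alt (pvRaiseWitness_Send_message.1) (pvRaiseWitness_Send_message.2.1) (pvRaiseWitness_Send_message.2.2) = pvRaiseWitnessOut_Send_message)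

-- ===== LEMMAS AND PROOFS =====

-- ---- byte branch ----

lemma byteLoop_eq (l : List Char) : ∀ (temp : List Char),
    l.getLast? ≠ some '7' → l.getLast? ≠ some '1' →
    Send_message_byteLoop l temp
      = some (temp ++ Send_message_altPairs (l.zip l.tail) ++ l.getLast?.toList) := by
  induction l with
  | nil => intro temp _ _; simp [Send_message_byteLoop, Send_message_altPairs]
  | cons c rest ih =>
    intro temp h7 h1
    cases rest with
    | nil =>
      simp only [List.getLast?_singleton, ne_eq, Option.some.injEq] at h7 h1
      simp [Send_message_byteLoop, Send_message_altPairs, h7, h1]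
    | cons d rest' =>
      rw [List.getLast?_cons_cons] at h7 h1
      by_cases hc7 : c = '7'
      · subst hc7
        by_cases hdE : d = 'E'
        · subst hdE
          rw [show Send_message_byteLoop ('7' :: 'E' :: rest') temp
              = Send_message_byteLoop ('E' :: rest') (temp ++ ['1', 'B', '7']) from rfl,
            ih _ h7 h1]
          simp [Send_message_altPairs]
        · rw [show Send_message_byteLoop ('7' :: d :: rest') temp
              = if d = 'E' then Send_message_byteLoop (d :: rest') (temp ++ ['1', 'B', '7'])
                else Send_message_byteLoop (d :: rest') (temp ++ ['7']) from rfl,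
            if_neg hdE, ih _ h7 h1]
          simp [Send_message_altPairs, hdE]
      · by_cases hc1 : c = '1'
        · subst hc1
          by_cases hdB : d = 'B'
          · subst hdB
            rw [show Send_message_byteLoop ('1' :: 'B' :: rest') temp
                = Send_message_byteLoop ('B' :: rest') (temp ++ ['1', 'B', '1']) from rfl,
              ih _ h7 h1]
            simp [Send_message_altPairs]
          · rw [show Send_message_byteLoop ('1' :: d :: rest') temp
                = if d = 'B' then Send_message_byteLoop (d :: rest') (temp ++ ['1', 'B', '1'])
                  else Send_message_byteLoop (d :: rest') (temp ++ ['1']) from rfl,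
              if_neg hdB, ih _ h7 h1]
            simp [Send_message_altPairs, hdB]
        · rw [show Send_message_byteLoop (c :: d :: rest') temp
              = if c = '7' then (match (d :: rest').head? with
                  | none => none
                  | some e => if e = 'E' then Send_message_byteLoop (d :: rest') (temp ++ ['1', 'B', '7'])
                              else Send_message_byteLoop (d :: rest') (temp ++ [c]))
                else if c = '1' then (match (d :: rest').head? with
                  | none => none
                  | some e => if e = 'B' then Send_message_byteLoop (d :: rest') (temp ++ ['1', 'B', '1'])
                              else Send_message_byteLoop (d :: rest') (temp ++ [c]))
                else Send_message_byteLoop (d :: rest') (temp ++ [c]) from rfl,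
            if_neg hc7, if_neg hc1, ih _ h7 h1]
          simp [Send_message_altPairs, hc7, hc1]

lemma slice_last (l : List Char) : PySem.List.slice l (some (-1)) none = l.getLast?.toList := by
  rcases l.eq_nil_or_concat with rfl | ⟨init, a, rfl⟩
  · rfl
  · simp [PySem.List.slice, PySem.List.clampIdx]
    split_ifs <;> simp

def bitS : List Char → Nat → List Char
  | [], _ => []
  | c :: t, count =>
    let cnt := if c = '1' then count + 1 else 0
    if cnt = 5 then c :: '0' :: bitS t 0 else c :: bitS t cnt

def ones (n : Nat) : List Char := List.replicate n '1'

def bitR (l : List Char) : List Char :=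
  if (ones 5).isPrefixOf l then ones 5 ++ '0' :: bitR (l.drop 5)
  else match l with
    | [] => []
    | c :: t => c :: bitR t
termination_by l.length
decreasing_by
  · have h5 : 5 ≤ l.length := by
      have := List.IsPrefix.length_le (List.isPrefixOf_iff_prefix.mp (by assumption))
      simpa [ones] using this
    simp; omega
  · simp_all

lemma bitLoop_eq_S (l : List Char) : ∀ temp count,
    Send_message_bitLoop l temp count = temp ++ bitS l count := by
  induction l with
  | nil => intro temp count; simp [Send_message_bitLoop, bitS]
  | cons c t ih =>
    intro temp count
    simp only [Send_message_bitLoop, bitS]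
    split <;> simp [ih] <;> split <;> simp

lemma go_eq_R : ∀ (fuel : Nat) (l acc : List Char), l.length ≤ fuel →
    PySem.Chars.replace.go (ones 5) (ones 5 ++ ['0']) fuel l acc = acc.reverse ++ bitR l := by
  intro fuel
  induction fuel with
  | zero =>
    intro l acc h
    have : l = [] := List.eq_nil_of_length_eq_zero (Nat.le_zero.mp h)
    subst this
    rw [PySem.Chars.replace.go, bitR]
    simp [ones]
  | succ n ih =>
    intro l acc h
    cases l with
    | nil =>
      rw [PySem.Chars.replace.go, bitR]
      simp [ones]
      omega
    | cons c t =>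
      rw [PySem.Chars.replace.go]
      by_cases hp : (ones 5).isPrefixOf (c :: t)
      · rw [if_pos hp, ih _ _ (by simp [ones] at h ⊢; omega)]
        rw [bitR, if_pos hp]
        simp [ones]
      · rw [if_neg hp, ih _ _ (by simp at h ⊢; omega)]
        conv_rhs => rw [bitR]
        rw [if_neg hp]
        simp

lemma replace_eq_R (l : List Char) :
    PySem.Chars.replace l (ones 5) (ones 5 ++ ['0']) = bitR l := by
  rw [PySem.Chars.replace, if_neg (by simp [ones])]
  simpa using go_eq_R l.length l [] le_rfl

lemma no_ones_prefix : ∀ (k m : Nat) (t : List Char), k < m →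
    (∀ x, t.head? = some x → x ≠ '1') → ¬ (ones m <+: ones k ++ t) := by
  intro k
  induction k with
  | zero =>
    intro m t hm ht hp
    cases t with
    | nil => simp [ones] at hp; omega
    | cons x t' =>
      obtain ⟨m', rfl⟩ : ∃ m', m = m' + 1 := ⟨m - 1, by omega⟩
      rw [ones, List.replicate_succ] at hp
      rcases List.cons_prefix_cons.mp (by simpa [ones] using hp) with ⟨hx, _⟩
      exact ht x rfl hx.symm
  | succ k ih =>
    intro m t hm ht hp
    obtain ⟨m', rfl⟩ : ∃ m', m = m' + 1 := ⟨m - 1, by omega⟩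
    rw [ones, ones, List.replicate_succ, List.replicate_succ] at hp
    exact ih m' t (by omega) ht (by simpa [ones] using hp)

lemma S_run : ∀ (j c : Nat) (t : List Char), c + j ≤ 4 →
    (∀ x, t.head? = some x → x ≠ '1') →
    bitS (ones j ++ t) c = ones j ++ bitS t 0 := by
  intro j
  induction j with
  | zero =>
    intro c t hc ht
    cases t with
    | nil => simp [ones, bitS]
    | cons x t' =>
      have hx : x ≠ '1' := ht x rfl
      simp [ones, bitS, hx]
  | succ j ih =>
    intro c t hc ht
    rw [show ones (j+1) ++ t = '1' :: (ones j ++ t) by simp [ones, List.replicate_succ]]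
    have hstep : bitS ('1' :: (ones j ++ t)) c = '1' :: bitS (ones j ++ t) (c + 1) := by
      have h5 : ¬ (c + 1 = 5) := by omega
      simp [bitS, h5]
    rw [hstep, ih (c+1) t (by omega) ht]
    simp [ones, List.replicate_succ]

lemma R_run : ∀ (j : Nat) (t : List Char), j ≤ 4 →
    (∀ x, t.head? = some x → x ≠ '1') →
    bitR (ones j ++ t) = ones j ++ bitR t := by
  intro j
  induction j with
  | zero => intro t _ _; simp [ones]
  | succ j ih =>
    intro t hj ht
    rw [show ones (j+1) ++ t = '1' :: (ones j ++ t) by simp [ones, List.replicate_succ]]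
    have hnp : ¬ (ones 5).isPrefixOf ('1' :: (ones j ++ t)) := by
      rw [List.isPrefixOf_iff_prefix]
      have := no_ones_prefix (j+1) 5 t (by omega) ht
      simpa [ones, List.replicate_succ] using this
    rw [bitR, if_neg hnp, ih t (by omega) ht]
    simp [ones, List.replicate_succ]

lemma S_run0 (j : Nat) (t : List Char) (hj : j ≤ 4)
    (ht : ∀ x, t.head? = some x → x ≠ '1') :
    bitS (ones j ++ t) 0 = ones j ++ bitS t 0 := S_run j 0 t (by omega) ht

lemma S_ones (t : List Char) : bitS (ones 5 ++ t) 0 = ones 5 ++ '0' :: bitS t 0 := by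
  show bitS ('1' :: '1' :: '1' :: '1' :: '1' :: t) 0 = '1' :: '1' :: '1' :: '1' :: '1' :: '0' :: bitS t 0
  simp [bitS]

lemma S_eq_R : ∀ (n : Nat) (l : List Char), l.length ≤ n → bitS l 0 = bitR l := by
  intro n
  induction n with
  | zero =>
    intro l h
    have : l = [] := List.eq_nil_of_length_eq_zero (Nat.le_zero.mp h)
    subst this
    rw [bitR]
    simp [bitS, ones]
  | succ n ih =>
    intro l h
    by_cases hp : (ones 5).isPrefixOf l
    · obtain ⟨t, rfl⟩ : ∃ t, l = ones 5 ++ t := by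
        obtain ⟨t, ht⟩ := List.isPrefixOf_iff_prefix.mp hp
        exact ⟨t, ht.symm⟩
      rw [S_ones]
      have hp' : (ones 5).isPrefixOf ('1' :: '1' :: '1' :: '1' :: '1' :: t) = true := hp
      rw [show (ones 5 ++ t : List Char) = '1' :: '1' :: '1' :: '1' :: '1' :: t from rfl]
      rw [bitR, if_pos hp']
      have ht : t.length ≤ n := by
        simp [ones] at h; omega
      rw [show ('1' :: '1' :: '1' :: '1' :: '1' :: t : List Char).drop 5 = t from rfl, ih t ht]
    · cases l with
      | nil => rw [bitR]; simp [bitS, ones]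
      | cons c t =>
        by_cases hc : c = '1'
        · -- leading run of ones, shorter than 5
          subst hc
          set p : Char → Bool := fun x => x == '1' with hpdef
          set l := '1' :: t with hldef
          have hsplit : l.takeWhile p ++ l.dropWhile p = l := List.takeWhile_append_dropWhile
          have hones : l.takeWhile p = ones (l.takeWhile p).length := by
            apply List.eq_replicate_of_mem
            intro b hb
            have := List.mem_takeWhile_imp hb
            simpa [hpdef] using this
          have hhead : ∀ x, (l.dropWhile p).head? = some x → x ≠ '1' := by
            intro x hx
            have := List.head?_dropWhile_not p l
            rw [hx] at this
            simpa [hpdef] using this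
          set j := (l.takeWhile p).length with hjdef
          have hj4 : j ≤ 4 := by
            by_contra hj
            apply hp
            rw [List.isPrefixOf_iff_prefix]
            have h2 : ones j <+: l := by
              conv_rhs => rw [← hsplit, hones]
              exact List.prefix_append _ _
            have h1 : ones 5 <+: ones j := by
              refine ⟨ones (j - 5), ?_⟩
              rw [ones, ones, ones, ← List.replicate_add]
              congr 1
              omega
            exact h1.trans h2
          have hj1 : 1 ≤ j := by
            rw [hjdef, hldef]
            simp [List.takeWhile, hpdef]
          have hdlen : (l.dropWhile p).length ≤ n := by
            have h1 : j + (l.dropWhile p).length = l.length := by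
              conv_rhs => rw [← hsplit]
              rw [List.length_append, hjdef]
            have : l.length ≤ n + 1 := h
            omega
          conv_lhs => rw [← hsplit, hones]
          conv_rhs => rw [← hsplit, hones]
          rw [S_run0 j _ hj4 hhead, R_run j _ hj4 hhead, ih _ hdlen]
        · -- head is not '1'
          have hS : bitS (c :: t) 0 = c :: bitS t 0 := by simp [bitS, hc]
          rw [hS, bitR, if_neg hp, ih t (by simp at h; omega)]

-- ===== VERDICT (by name: the statement is the Claim_ definition above) =====
theorem Send_message_spec : Claim_equal_Send_message := by
  intro F I fl _ hpre
  unfold Spec_Send_message Send_message Send_message_alt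
  by_cases h0 : fl = 0
  · subst h0
    rw [if_pos rfl, if_pos rfl]
    refine String.toList_inj.mp ?_
    rw [String.toList_append, String.toList_append, PySem.Str.toList_replace]
    rw [show ("11111" : String).toList = ones 5 from rfl,
      show ("111110" : String).toList = ones 5 ++ ['0'] from rfl,
      replace_eq_R, ← S_eq_R I.toList.length I.toList le_rfl, bitLoop_eq_S]
    simp
  · rcases hpre with h | ⟨h7, h1⟩
    · contradiction
    rw [if_neg h0, if_neg h0]
    rw [byteLoop_eq I.toList F.toList h7 h1]
    refine String.toList_inj.mp ?_
    simp [String.toList_append, PySem.Str.toList_slice, slice_last]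

theorem Send_message_raises : Claim_raises_Send_message := by
  unfold Claim_raises_Send_message
  exact ⟨by intro F I fl _ hr hp; rcases hr with ⟨h0, h⟩; rcases hp with h | ⟨h7, h1⟩ <;> tauto, by decide⟩

-- self-check: the raise witness is indeed excluded by Pre_ (uses Send_message_raises)
theorem pvRaiseWitness_outside_Pre_ok :
    ¬ Pre_Send_message pvRaiseWitness_Send_message.1 pvRaiseWitness_Send_message.2.1
        pvRaiseWitness_Send_message.2.2 :=
  Send_message_raises.1 _ _ _ (by decide) (by decide)
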